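-- pv_equiv track=rewrite | github.com/Chao-hu-Lab/XIC_Extractor | tools/diagnostics/multi_tag_adduct_audit.py | _tag_overlap
-- ===== SOURCE A (Python) =====
-- from collections import Counter
--
-- def _tag_overlap(rows: tuple[dict[str, str], ...]) -> dict[str, int]:
--     counts: Counter[str] = Counter()
--     for row in rows:
--         tags = row.get("matched_tag_names") or row.get("neutral_loss_tag", "")
--         normalized = tuple(tag for tag in tags.split(";") if tag)
--         if normalized:
--             counts[";".join(sorted(normalized))] += 1
--     return dict(sorted(counts.items()))
-- ===== SOURCE B (Python) =====
-- def _tag_overlap(rows):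
--     # Collect one normalized key per contributing row, sort, then run-length encode.
--     keys = []
--     for row in rows:
--         tags = row.get("matched_tag_names") or row.get("neutral_loss_tag", "")
--         norm = sorted(t for t in tags.split(";") if t)
--         if norm:
--             keys.append(";".join(norm))
--     keys.sort()
--     out = {}
--     i = 0
--     n = len(keys)
--     while i < n:
--         j = i + 1
--         while j < n and keys[j] == keys[i]:
--             j += 1
--         out[keys[i]] = j - i
--         i = j
--     return out
-- ===== Notes on version B (the rewrite author's own statement) =====
-- stated objective: alternative
-- what changed: B replaces A's Counter-accumulation followed by dict(sorted(...)) with a different decomposition: it collects one normalized key string per contributing row, sorts the key list once, and run-length encodes the sorted runs into the result dict, so no Counter and no final sort of items is needed.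
import Mathlib
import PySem

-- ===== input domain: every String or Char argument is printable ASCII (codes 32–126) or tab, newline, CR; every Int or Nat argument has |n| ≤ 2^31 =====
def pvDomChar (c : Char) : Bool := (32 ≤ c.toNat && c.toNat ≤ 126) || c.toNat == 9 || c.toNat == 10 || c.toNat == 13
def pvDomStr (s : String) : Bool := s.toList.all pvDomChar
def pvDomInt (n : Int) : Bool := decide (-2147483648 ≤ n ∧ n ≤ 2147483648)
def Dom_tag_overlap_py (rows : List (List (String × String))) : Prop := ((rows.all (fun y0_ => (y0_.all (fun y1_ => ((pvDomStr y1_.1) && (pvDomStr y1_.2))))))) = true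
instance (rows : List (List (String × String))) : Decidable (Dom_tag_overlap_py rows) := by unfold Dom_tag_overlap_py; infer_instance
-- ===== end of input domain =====

-- B replaces A's Counter-then-sort with: collect one normalized key per row, sort the key
-- list, then run-length encode the sorted list (objective: alternative decomposition).

-- ===== PORT A =====
-- shared helper: row.get("matched_tag_names") or row.get("neutral_loss_tag", "")
def pvRowTags (row : List (String × String)) : String :=
  match (PySem.Dict.mk row).get? "matched_tag_names" with
  | some s => if s = "" then (PySem.Dict.mk row).getD "neutral_loss_tag" "" else s
  | none => (PySem.Dict.mk row).getD "neutral_loss_tag" ""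

def tag_overlap_py (rows : List (List (String × String))) : List (String × Int) :=
  let counts : PySem.Dict String Int := rows.foldl (fun counts row =>
    let tags := pvRowTags row
    let normalized := ((PySem.Str.split? tags ";").getD []).filter (fun t => t ≠ "")
    if normalized ≠ [] then
      counts.modify (PySem.Str.join ";" (PySem.List.sorted normalized (fun x => x) false)) 0 (· + 1)
    else counts) PySem.Dict.empty
  PySem.List.sorted2 counts.items (fun p => p.1) (fun p => p.2) false

-- ===== PORT B =====
def pvTagKey? (row : List (String × String)) : Option String :=
  let tags := pvRowTags row
  let norm := PySem.List.sorted (((PySem.Str.split? tags ";").getD []).filter (fun t => t ≠ "")) (fun x => x) false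
  if norm = [] then none else some (PySem.Str.join ";" norm)

-- run-length encoding of a (sorted) list of keys: the two index while-loops of Source B
def pvRle : List String → List (String × Int)
  | [] => []
  | k :: rest =>
    (k, 1 + ((rest.takeWhile (fun t => t == k)).length : Int)) ::
      pvRle (rest.drop (rest.takeWhile (fun t => t == k)).length)
  termination_by l => l.length
  decreasing_by simp [List.length_drop]

def tag_overlap_py_alt (rows : List (List (String × String))) : List (String × Int) :=
  pvRle (PySem.List.sorted (rows.filterMap pvTagKey?) (fun x => x) false)

-- ===== PRECONDITION & SPEC =====
def Spec_tag_overlap_py (rows : List (List (String × String))) (out : List (String × Int)) : Prop := out = tag_overlap_py_alt rows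
instance (rows : List (List (String × String))) (out : List (String × Int)) : Decidable (Spec_tag_overlap_py rows out) := by unfold Spec_tag_overlap_py; infer_instance

-- ===== CLAIM (what is proved, stated in full; the proofs are below) =====
def Claim_equal_tag_overlap_py : Prop := ∀ (rows : List (List (String × String))), Dom_tag_overlap_py rows → Spec_tag_overlap_py rows (tag_overlap_py rows)

-- ===== LEMMAS AND PROOFS =====

theorem pv_foldA_eq (rows : List (List (String × String))) :
    ∀ d : PySem.Dict String Int,
    rows.foldl (fun counts row =>
      let tags := pvRowTags row
      let normalized := ((PySem.Str.split? tags ";").getD []).filter (fun t => t ≠ "")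
      if normalized ≠ [] then
        counts.modify (PySem.Str.join ";" (PySem.List.sorted normalized (fun x => x) false)) 0 (· + 1)
      else counts) d
    = (rows.filterMap pvTagKey?).foldl (fun d k => d.modify k 0 (· + 1)) d := by
  induction rows with
  | nil => intro d; rfl
  | cons row rest ih =>
    intro d
    simp only [List.foldl_cons, List.filterMap_cons]
    by_cases h : ((PySem.Str.split? (pvRowTags row) ";").getD []).filter (fun t => t ≠ "") = []
    · have h' : ∀ a ∈ (PySem.Str.split? (pvRowTags row) ";").getD [], a = "" := by
        intro a ha
        by_contra hne
        have : a ∈ List.filter (fun t => decide (t ≠ "")) ((PySem.Str.split? (pvRowTags row) ";").getD []) :=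
          List.mem_filter.mpr ⟨ha, by simp [hne]⟩
        rw [h] at this
        exact absurd this (by simp)
      have hk : pvTagKey? row = none := by
        simp [pvTagKey?, PySem.List.sorted_eq_nil_iff]
        exact h'
      simp only [hk, h, ne_eq, not_true_eq_false, if_false, if_neg]
      exact ih d
    · have hk : pvTagKey? row = some (PySem.Str.join ";"
        (PySem.List.sorted (((PySem.Str.split? (pvRowTags row) ";").getD []).filter (fun t => t ≠ "")) (fun x => x) false)) := by
        simp only [pvTagKey?]
        rw [if_neg (by simpa [PySem.List.sorted_eq_nil_iff] using h)]
      simp only [hk, if_pos h, List.foldl_cons]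
      exact ih _
  termination_by rows

theorem pv_insertBy_congr {α : Type} (b1 b2 : α → α → Bool) (x : α) :
    ∀ acc : List α, (∀ y ∈ acc, b1 x y = b2 x y) →
    PySem.List.insertBy b1 x acc = PySem.List.insertBy b2 x acc := by
  intro acc
  induction acc with
  | nil => intro _; rfl
  | cons y ys ih =>
    intro h
    simp only [PySem.List.insertBy]
    rw [h y (by simp)]
    by_cases hb : b2 x y = true
    · simp [hb]
    · simp only [hb, if_false, if_neg hb]
      rw [ih (fun z hz => h z (by simp [hz]))]

theorem pv_foldl_insertBy_congr {α : Type} (S : List α) (b1 b2 : α → α → Bool)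
    (h : ∀ a ∈ S, ∀ b ∈ S, b1 a b = b2 a b) :
    ∀ (xs acc : List α), (∀ x ∈ xs, x ∈ S) → (∀ y ∈ acc, y ∈ S) →
    xs.foldl (fun a x => PySem.List.insertBy b1 x a) acc = xs.foldl (fun a x => PySem.List.insertBy b2 x a) acc := by
  intro xs
  induction xs with
  | nil => intro acc _ _; rfl
  | cons x t ih =>
    intro acc hxs hacc
    simp only [List.foldl_cons]
    rw [pv_insertBy_congr b1 b2 x acc (fun y hy => h x (hxs x (by simp)) y (hacc y hy))]
    exact ih _ (fun z hz => hxs z (by simp [hz]))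
      (fun y hy => by
        rcases (PySem.List.mem_insertBy b2 x y acc).1 hy with rfl | hy
        · exact hxs y (by simp)
        · exact hacc y hy)

theorem pv_sorted2_eq_sorted_fst (xs : List (String × Int))
    (h : ∀ a ∈ xs, ∀ b ∈ xs, a.1 = b.1 → a = b) :
    PySem.List.sorted2 xs (fun p => p.1) (fun p => p.2) false
      = PySem.List.sorted xs (fun p => p.1) false := by
  simp only [PySem.List.sorted2, PySem.List.sorted, if_neg (by decide : ¬ (false = true))]
  apply pv_foldl_insertBy_congr xs _ _ _ xs [] (fun x hx => hx) (by simp)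
  intro a ha b hb
  rcases lt_trichotomy a.1 b.1 with hlt | heq | hgt
  · simp [hlt, le_of_lt hlt]
  · have : a = b := h a ha b hb heq
    subst this
    simp
  · simp [hgt, not_lt_of_gt hgt, le_of_lt hgt]

theorem pv_foldl_add_of_mem {α : Type} [BEq α] [LawfulBEq α] :
    ∀ (t : List α) (s : PySem.Set α), (∀ x ∈ t, x ∈ s) → t.foldl PySem.Set.add s = s := by
  intro t
  induction t with
  | nil => intro s _; rfl
  | cons x t ih =>
    intro s hs
    simp only [List.foldl_cons]
    have hmem : x ∈ s := hs x (by simp)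
    have hx : PySem.Set.add s x = s := by
      simp [PySem.Set.add, PySem.Set.contains, List.contains_iff_mem, hmem]
    rw [hx]
    exact ih s (fun z hz => hs z (by simp [hz]))

theorem pv_foldl_add_cons {α : Type} [BEq α] [LawfulBEq α] (k : α) :
    ∀ (t : List α) (s : List α), k ∉ t →
    t.foldl PySem.Set.add (k :: s) = k :: t.foldl PySem.Set.add s := by
  intro t
  induction t with
  | nil => intro s _; rfl
  | cons x t ih =>
    intro s hk
    have hxk : x ≠ k := fun hxe => hk (by simp [hxe])
    simp only [List.foldl_cons]
    have hc : (PySem.Set.add (k :: s) x : List α) = k :: PySem.Set.add s x := by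
      simp only [PySem.Set.add, PySem.Set.contains]
      by_cases hm : x ∈ s
      · simp [List.contains_iff_mem, hm]
      · simp [List.contains_iff_mem, hxk, hm]
    rw [hc]
    exact ih _ (fun hkm => hk (by simp [hkm]))

theorem pv_not_mem_dropWhile (k : String) :
    ∀ rest : List String, (∀ x ∈ rest, k ≤ x) → rest.Pairwise (· ≤ ·) →
    k ∉ rest.dropWhile (fun t => t == k) := by
  intro rest
  induction rest with
  | nil => intro _ _; simp
  | cons a t ih =>
    intro hle hp
    by_cases hak : (a == k) = true
    · rw [List.dropWhile_cons, if_pos hak]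
      exact ih (fun x hx => hle x (by simp [hx])) hp.of_cons
    · rw [List.dropWhile_cons, if_neg hak]
      have hane : a ≠ k := by simpa using hak
      have hka : k < a := lt_of_le_of_ne (hle a (by simp)) (Ne.symm hane)
      intro hmem
      rcases List.mem_cons.1 hmem with rfl | hmem
      · exact hane rfl
      · exact absurd (List.rel_of_pairwise_cons hp hmem) (not_le.mpr hka)

theorem pv_ofList_sublist {α : Type} [BEq α] [LawfulBEq α] :
    ∀ (xs : List α) (s : List α), ∃ t, xs.foldl PySem.Set.add s = s ++ t ∧ t.Sublist xs := by
  intro xs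
  induction xs with
  | nil => intro s; exact ⟨[], by simp, by simp⟩
  | cons x xs ih =>
    intro s
    simp only [List.foldl_cons]
    by_cases hc : x ∈ s
    · rcases ih s with ⟨t, ht, hsub⟩
      have ha : PySem.Set.add s x = s := by
        simp [PySem.Set.add, PySem.Set.contains, List.contains_iff_mem, hc]
      exact ⟨t, by rw [ha, ht], hsub.cons x⟩
    · rcases ih (s ++ [x]) with ⟨t, ht, hsub⟩
      have ha : (PySem.Set.add s x : List α) = s ++ [x] := by
        simp [PySem.Set.add, PySem.Set.contains, List.contains_iff_mem, hc]
      refine ⟨x :: t, ?_, hsub.cons₂ x⟩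
      rw [ha, ht, List.append_assoc]
      rfl

theorem pv_rle_eq : ∀ l : List String, l.Pairwise (· ≤ ·) →
    pvRle l = (PySem.Set.ofList l).map (fun k => (k, (l.count k : Int))) := by
  intro l
  induction l using pvRle.induct with
  | case1 => intro _; simp [pvRle]
  | case2 k rest ih =>
    intro hp
    set run := rest.takeWhile (fun t => t == k) with hrun
    set rest' := rest.drop run.length with hrest'
    have hta : run ++ rest.dropWhile (fun t => t == k) = rest := by
      rw [hrun]; exact List.takeWhile_append_dropWhile
    have hdw : rest' = rest.dropWhile (fun t => t == k) := by
      rw [hrest']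
      conv_lhs => rw [← hta]
      exact List.drop_left
    have hsplit : rest = run ++ rest' := by rw [hdw]; exact hta.symm
    have hrunk : ∀ x ∈ run, x = k := by
      intro x hx
      have := List.mem_takeWhile_imp (hrun ▸ hx)
      simpa using this
    have hkrest' : k ∉ rest' := by
      rw [hdw]
      exact pv_not_mem_dropWhile k rest
        (fun x hx => List.rel_of_pairwise_cons hp hx) hp.of_cons
    have hcountk : (k :: rest).count k = run.length + 1 := by
      rw [List.count_cons_self, hsplit, List.count_append]
      have h1 : run.count k = run.length :=
        List.count_eq_length.mpr (fun b hb => by simp [hrunk b hb])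
      have h2 : rest'.count k = 0 := List.count_eq_zero.mpr hkrest'
      omega
    have hofl : (PySem.Set.ofList (k :: rest) : List String) = k :: PySem.Set.ofList rest' := by
      show List.foldl PySem.Set.add PySem.Set.empty (k :: rest) = _
      rw [List.foldl_cons]
      have hek : PySem.Set.add PySem.Set.empty k = [k] := by rfl
      rw [hek, hsplit, List.foldl_append]
      rw [pv_foldl_add_of_mem run [k] (fun x hx => by simp [hrunk x hx])]
      exact pv_foldl_add_cons k rest' [] hkrest'
    have hrle : pvRle (k :: rest) = (k, 1 + (run.length : Int)) :: pvRle rest' := by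
      rw [pvRle]
    rw [hrle, hofl, List.map_cons]
    have hpr' : rest'.Pairwise (· ≤ ·) := by
      rw [hdw]
      exact List.Pairwise.sublist (List.dropWhile_sublist _) hp.of_cons
    rw [ih hpr']
    congr 1
    · simp only [hcountk]
      push_cast
      ring_nf
    · apply List.map_congr_left
      intro k' hk'
      have hk'mem : k' ∈ rest' := by
        have := (PySem.Set.mem_ofList rest' k').1 hk'
        exact this
      have hk'ne : k' ≠ k := fun he => hkrest' (he ▸ hk'mem)
      have hrunz : run.count k' = 0 := List.count_eq_zero.mpr
        (fun hm => hk'ne (hrunk k' hm))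
      have : (k :: rest).count k' = rest'.count k' := by
        rw [hsplit]
        simp [List.count_cons, List.count_append, hrunz, Ne.symm hk'ne]
      rw [this]

theorem tag_overlap_main (rows : List (List (String × String))) :
    tag_overlap_py rows = tag_overlap_py_alt rows := by
  classical
  set keys := rows.filterMap pvTagKey? with hkeys
  set s := PySem.List.sorted keys (fun x => x) false with hs
  -- A's counter equals Counter(keys)
  have hA : tag_overlap_py rows
      = PySem.List.sorted2 (PySem.Dict.counter keys).items (fun p => p.1) (fun p => p.2) false := by
    simp only [tag_overlap_py]
    rw [pv_foldA_eq rows PySem.Dict.empty]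
    rfl
  -- drop the snd-component tiebreak: the items' keys are distinct
  have hnodup : ((PySem.Dict.counter keys).items.map (fun p => p.1)).Nodup :=
    PySem.Dict.nodup_keys_counter keys
  have hinj : ∀ a ∈ (PySem.Dict.counter keys).items, ∀ b ∈ (PySem.Dict.counter keys).items,
      a.1 = b.1 → a = b := by
    intro a ha b hb hab
    exact List.inj_on_of_nodup_map hnodup ha hb hab
  -- the canonical result
  have hperm_s : s.Perm keys := PySem.List.sorted_perm keys (fun x => x) false
  have hsetperm : (PySem.Set.ofList s : List String).Perm (PySem.Set.ofList keys) := by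
    rw [List.perm_ext_iff_of_nodup (PySem.Set.nodup_ofList s) (PySem.Set.nodup_ofList keys)]
    intro a
    rw [PySem.Set.mem_ofList, PySem.Set.mem_ofList]
    exact hperm_s.mem_iff
  have hps : s.Pairwise (· ≤ ·) := PySem.List.sorted_pairwise keys (fun x => x)
  have hofs_lt : (PySem.Set.ofList s : List String).Pairwise (· < ·) := by
    rcases pv_ofList_sublist s [] with ⟨t, ht, hsub⟩
    have hofeq : (PySem.Set.ofList s : List String) = t := by
      simpa [PySem.Set.ofList, PySem.Set.empty] using ht
    rw [hofeq]
    have hle : t.Pairwise (· ≤ ·) := List.Pairwise.sublist hsub hps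
    have hne : t.Pairwise (· ≠ ·) := by
      rw [← hofeq]; exact PySem.Set.nodup_ofList s
    rw [← hofeq] at hle hne ⊢
    exact (hle.and hne).imp (fun h => lt_of_le_of_ne h.1 h.2)
  have hsortedset : PySem.List.sorted (PySem.Set.ofList keys) (fun x => x) false
      = PySem.Set.ofList s :=
    PySem.List.sorted_eq_of_perm_of_pairwise_lt _ _ _ hsetperm hofs_lt
  -- A's side equals canonical
  have hAcanon : tag_overlap_py rows
      = (PySem.Set.ofList s : List String).map (fun k => (k, (keys.count k : Int))) := by
    rw [hA, pv_sorted2_eq_sorted_fst _ hinj]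
    apply PySem.List.sorted_eq_of_perm_of_pairwise_lt
    · rw [PySem.Dict.items_counter keys, ← hsortedset]
      exact (PySem.List.sorted_perm (PySem.Set.ofList keys) (fun x => x) false).map _
    · rw [← hsortedset]
      have := PySem.List.sorted_ofList_pairwise_lt keys
      exact this.map _ (fun a b h => h)
  -- B's side equals canonical
  have hBcanon : tag_overlap_py_alt rows
      = (PySem.Set.ofList s : List String).map (fun k => (k, (keys.count k : Int))) := by
    simp only [tag_overlap_py_alt, ← hkeys, ← hs]
    rw [pv_rle_eq s hps]
    apply List.map_congr_left
    intro k _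
    rw [hperm_s.count_eq]
  rw [hAcanon, hBcanon]

-- ===== VERDICT (by name: the statement is the Claim_ definition above) =====
theorem tag_overlap_py_spec : Claim_equal_tag_overlap_py := by
  intro rows _
  show tag_overlap_py rows = tag_overlap_py_alt rows
  exact tag_overlap_main rows
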